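-- pv_equiv track=rewrite | github.com/Aasthaengg/IBMdataset | Python_codes/p03111/s035925987.py | calc
-- ===== SOURCE A (Python) =====
-- from itertools import groupby, accumulate, product, permutations, combinations
--
-- def calc(x,X):
--   n = len(x)
--   ans = 10**10
--   for q in product([0,1],repeat=n):
--     point = 0
--     cnt = 0
--     for i in range(n):
--       if q[i]==1:
--         if cnt>0:
--           point += 10
--         cnt += x[i]
--     if cnt>0:
--       point += abs(cnt-X)
--     else:
--       point = 10**10
--     ans = min(point,ans)
--   return ans
-- ===== SOURCE B (Python) =====
-- def calc(x, X):
--     # DP over achievable selected sums: dp maps sum -> minimum accumulated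
--     # join-penalty (10 per selected item after the first positive prefix sum),
--     # then minimize the final cost over the table.
--     dp = {0: 0}
--     for a in x:
--         ndp = dict(dp)
--         for s, j in dp.items():
--             c = j + (10 if s > 0 else 0)
--             t = s + a
--             if t not in ndp or c < ndp[t]:
--                 ndp[t] = c
--         dp = ndp
--     ans = 10**10
--     for s, j in dp.items():
--         if s > 0:
--             ans = min(ans, j + abs(s - X))
--     return ans
-- ===== Notes on version B (the rewrite author's own statement) =====
-- stated objective: faster
-- what changed: Replaces brute-force enumeration of all 2^n subsets (each rescanned with an inner O(n) loop) by a dynamic program over achievable selected sums keeping the minimum join-penalty per sum, then minimizing the cost over the table.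
import Mathlib
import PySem

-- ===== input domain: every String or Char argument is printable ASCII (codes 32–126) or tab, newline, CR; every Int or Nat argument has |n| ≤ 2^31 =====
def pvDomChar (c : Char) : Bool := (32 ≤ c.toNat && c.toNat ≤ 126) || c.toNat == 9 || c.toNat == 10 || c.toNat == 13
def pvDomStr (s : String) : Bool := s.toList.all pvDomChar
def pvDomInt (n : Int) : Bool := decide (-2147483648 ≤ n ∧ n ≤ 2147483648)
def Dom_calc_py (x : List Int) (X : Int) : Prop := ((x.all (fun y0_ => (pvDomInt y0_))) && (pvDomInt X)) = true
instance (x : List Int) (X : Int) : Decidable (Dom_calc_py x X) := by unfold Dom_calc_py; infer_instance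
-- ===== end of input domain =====

-- B replaces A's brute-force enumeration of all 2^n subsets by a DP over achievable
-- selected sums keeping the minimum join-penalty per sum (objective: faster).

-- ===== PORT A =====
-- itertools.product([0,1], repeat=n), in itertools order (first coordinate varies slowest)
def pvProducts01 : Nat → List (List Int)
  | 0 => [[]]
  | n + 1 => (pvProducts01 n).map (fun q => 0 :: q) ++ (pvProducts01 n).map (fun q => 1 :: q)

def calc_py (x : List Int) (X : Int) : Int :=
  let n := x.length
  (pvProducts01 n).foldl
    (fun ans q =>
      -- inner loop: state (point, cnt); q[i]/x[i] are always in range (len q = n)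
      let pc : Int × Int :=
        (PySem.List.pyRange 0 (n : Int) 1).foldl
          (fun pc i =>
            if PySem.List.pyGetD q i 0 = 1 then
              (pc.1 + (if pc.2 > 0 then 10 else 0), pc.2 + PySem.List.pyGetD x i 0)
            else pc)
          ((0 : Int), (0 : Int))
      let point : Int := if pc.2 > 0 then pc.1 + |pc.2 - X| else 10 ^ 10
      min point ans)
    (10 ^ 10)

-- ===== PORT B =====
-- 't not in ndp or c < ndp[t]: ndp[t] = c' ported as a match on ndp.get? t (exact)
def calc_py_alt (x : List Int) (X : Int) : Int :=
  let dp :=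
    x.foldl
      (fun dp a =>
        dp.items.foldl
          (fun ndp (p : Int × Int) =>
            let c := p.2 + (if p.1 > 0 then 10 else 0)
            let t := p.1 + a
            match ndp.get? t with
            | none => ndp.insert t c
            | some v => if c < v then ndp.insert t c else ndp)
          dp)
      (PySem.Dict.ofList [((0 : Int), (0 : Int))])
  dp.items.foldl
    (fun ans (p : Int × Int) => if p.1 > 0 then min ans (p.2 + |p.1 - X|) else ans)
    (10 ^ 10)

-- ===== PRECONDITION & SPEC =====
def Spec_calc_py (x : List Int) (X : Int) (out : Int) : Prop := out = calc_py_alt x X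
instance (x : List Int) (X : Int) (out : Int) : Decidable (Spec_calc_py x X out) := by unfold Spec_calc_py; infer_instance

-- ===== CLAIM (what is proved, stated in full; the proofs are below) =====
def Claim_equal_calc_py : Prop := ∀ (x : List Int) (X : Int), Dom_calc_py x X → Spec_calc_py x X (calc_py x X)

-- ===== LEMMAS AND PROOFS =====

-- ---------- proof-side helper definitions ----------

def pvGate (s : Int) : Int := if s > 0 then 10 else 0

def pvTrans (a : Int) (p : Int × Int) : Int × Int := (p.1 + a, p.2 + pvGate p.1)

def pvCost (X : Int) (p : Int × Int) : Int := if p.1 > 0 then p.2 + |p.1 - X| else 10 ^ 10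

-- all (sum, join-penalty) outcomes of the subsets of xs, starting from state p
def pvFinals : List Int → Int × Int → List (Int × Int)
  | [], p => [p]
  | a :: xs, p => pvFinals xs p ++ pvFinals xs (pvTrans a p)

-- outcome of one selection vector q over xs
def pvSel (qs xs : List Int) (p : Int × Int) : Int × Int :=
  (qs.zip xs).foldl (fun p ba => if ba.1 = 1 then pvTrans ba.2 p else p) p

def pvStepP (P : List (Int × Int)) (a : Int) : List (Int × Int) :=
  P ++ P.map (pvTrans a)

-- minimum of a list of Ints, as an Option
def pvMinL : List Int → Option Int
  | [] => none
  | v :: t => some (match pvMinL t with | none => v | some m => min v m)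

def pvOmin : Option Int → Option Int → Option Int
  | none, o => o
  | some v, none => some v
  | some v, some w => some (min v w)

def pvMinJ (P : List (Int × Int)) (s : Int) : Option Int :=
  pvMinL ((P.filter (fun p => p.1 = s)).map (·.2))

def pvUpd (a : Int) (ndp : PySem.Dict Int Int) (p : Int × Int) : PySem.Dict Int Int :=
  let c := p.2 + (if p.1 > 0 then 10 else 0)
  let t := p.1 + a
  match ndp.get? t with
  | none => ndp.insert t c
  | some v => if c < v then ndp.insert t c else ndp

def pvStepD (a : Int) (dp : PySem.Dict Int Int) : PySem.Dict Int Int :=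
  dp.items.foldl (pvUpd a) dp

def pvInv (d : PySem.Dict Int Int) (P : List (Int × Int)) : Prop :=
  d.keys.Nodup ∧ ∀ s, d.get? s = pvMinJ P s

-- ---------- generic mini-lemmas ----------

theorem pvMinL_le {l : List Int} {m : Int} (h : pvMinL l = some m) :
    ∀ v ∈ l, m ≤ v := by
  induction l generalizing m with
  | nil => simp [pvMinL] at h
  | cons v t ih =>
    intro w hw
    simp only [pvMinL] at h
    cases ht : pvMinL t with
    | none =>
      rw [ht] at h
      have ht0 : t = [] := by
        cases t with
        | nil => rfl
        | cons b tb => simp [pvMinL] at ht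
      subst ht0
      simp only [List.mem_singleton] at hw
      have h' : v = m := Option.some.inj h
      omega
    | some mt =>
      rw [ht] at h
      rcases List.mem_cons.1 hw with rfl | hw'
      · cases h; exact min_le_left _ _
      · cases h; exact le_trans (min_le_right _ _) (ih ht _ hw')

theorem pvMinL_mem {l : List Int} {m : Int} (h : pvMinL l = some m) : m ∈ l := by
  induction l generalizing m with
  | nil => simp [pvMinL] at h
  | cons v t ih =>
    simp only [pvMinL] at h
    cases ht : pvMinL t with
    | none => rw [ht] at h; cases h; exact List.mem_cons_self
    | some mt =>
      rw [ht] at h; cases h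
      rcases le_total v mt with hle | hle
      · simp [min_eq_left hle]
      · simp [min_eq_right hle, ih ht]

theorem pvMinL_ne_none {l : List Int} (h : l ≠ []) : pvMinL l ≠ none := by
  cases l with
  | nil => exact absurd rfl h
  | cons v t => simp [pvMinL]

theorem pvMinL_append (l₁ l₂ : List Int) :
    pvMinL (l₁ ++ l₂) = pvOmin (pvMinL l₁) (pvMinL l₂) := by
  induction l₁ with
  | nil => simp [pvMinL, pvOmin]
  | cons v t ih =>
    simp only [List.cons_append, pvMinL, ih]
    cases pvMinL t with
    | none => cases pvMinL l₂ <;> simp [pvOmin]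
    | some mt => cases pvMinL l₂ <;> simp [pvOmin, min_assoc]

theorem pvMinL_map_add (l : List Int) (c : Int) :
    pvMinL (l.map (· + c)) = (pvMinL l).map (· + c) := by
  induction l with
  | nil => simp [pvMinL]
  | cons v t ih =>
    simp only [List.map_cons, pvMinL, ih]
    cases pvMinL t with
    | none => simp
    | some mt => simp [min_add_add_right]

theorem pvFoldlPreserves {α β : Type} {Q : α → Prop} {f : α → β → α}
    (hf : ∀ d p, Q d → Q (f d p)) :
    ∀ (l : List β) (d : α), Q d → Q (l.foldl f d) := by
  intro l
  induction l with
  | nil => intro d h; exact h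
  | cons p t ih => intro d h; exact ih _ (hf d p h)

-- ---------- min-fold over costs ----------

theorem pvFoldF_le (X : Int) (l : List (Int × Int)) :
    ∀ ans : Int, l.foldl (fun ans p => min (pvCost X p) ans) ans ≤ ans := by
  induction l with
  | nil => intro ans; simp
  | cons p t ih =>
    intro ans
    exact le_trans (ih _) (min_le_right _ _)

theorem pvFoldF_le_mem (X : Int) (l : List (Int × Int)) :
    ∀ ans : Int, ∀ p ∈ l, l.foldl (fun ans p => min (pvCost X p) ans) ans ≤ pvCost X p := by
  induction l with
  | nil => intro ans p hp; simp at hp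
  | cons q t ih =>
    intro ans p hp
    rcases List.mem_cons.1 hp with rfl | hp'
    · exact le_trans (pvFoldF_le X t _) (min_le_left _ _)
    · exact ih _ _ hp'

theorem pvFoldF_cases (X : Int) (l : List (Int × Int)) :
    ∀ ans : Int, l.foldl (fun ans p => min (pvCost X p) ans) ans = ans ∨
      ∃ p ∈ l, l.foldl (fun ans p => min (pvCost X p) ans) ans = pvCost X p := by
  induction l with
  | nil => intro ans; left; rfl
  | cons q t ih =>
    intro ans
    rcases ih (min (pvCost X q) ans) with h | ⟨p, hp, h⟩
    · rcases le_total (pvCost X q) ans with hle | hle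
      · right
        refine ⟨q, List.mem_cons_self, ?_⟩
        simp only [List.foldl_cons]
        rw [min_eq_left hle] at h ⊢
        exact h
      · left
        simp only [List.foldl_cons]
        rw [min_eq_right hle] at h ⊢
        exact h
    · right; exact ⟨p, List.mem_cons_of_mem _ hp, by simp only [List.foldl_cons, h]⟩

-- ---------- A-side reduction ----------

theorem pvProducts01_length {n : Nat} {q : List Int} (h : q ∈ pvProducts01 n) :
    q.length = n := by
  induction n generalizing q with
  | zero => simp [pvProducts01] at h; simp [h]
  | succ m ih =>
    simp only [pvProducts01, List.mem_append, List.mem_map] at h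
    rcases h with ⟨q', hq', rfl⟩ | ⟨q', hq', rfl⟩ <;> simp [ih hq']

theorem pvZipFold_swap (l : List (Int × Int)) :
    ∀ pc : Int × Int,
      l.foldl (fun pc (ba : Int × Int) =>
          if ba.1 = 1 then (pc.1 + (if pc.2 > 0 then 10 else 0), pc.2 + ba.2) else pc) pc
        = ((l.foldl (fun p ba => if ba.1 = 1 then pvTrans ba.2 p else p) (pc.2, pc.1)).2,
           (l.foldl (fun p ba => if ba.1 = 1 then pvTrans ba.2 p else p) (pc.2, pc.1)).1) := by
  induction l with
  | nil => intro pc; rfl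
  | cons ba t ih =>
    intro pc
    simp only [List.foldl_cons]
    by_cases hb : ba.1 = 1
    · rw [if_pos hb, if_pos hb, ih]
      simp only [pvTrans, pvGate]
    · rw [if_neg hb, if_neg hb, ih]

theorem pvInner_eq (q x : List Int) (h : q.length = x.length) :
    (PySem.List.pyRange 0 (x.length : Int) 1).foldl
        (fun pc i =>
          if PySem.List.pyGetD q i 0 = 1 then
            (pc.1 + (if pc.2 > 0 then 10 else 0), pc.2 + PySem.List.pyGetD x i 0)
          else pc)
        ((0 : Int), (0 : Int))
      = ((pvSel q x (0, 0)).2, (pvSel q x (0, 0)).1) := by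
  have hlen : (q.zip x).length = x.length := by
    rw [List.length_zip, h, Nat.min_self]
  have hcong : (PySem.List.pyRange 0 (x.length : Int) 1).foldl
      (fun pc i =>
        if PySem.List.pyGetD q i 0 = 1 then
          (pc.1 + (if pc.2 > 0 then 10 else 0), pc.2 + PySem.List.pyGetD x i 0)
        else pc)
      ((0 : Int), (0 : Int))
      = (PySem.List.pyRange 0 ((q.zip x).length : Int) 1).foldl
      (fun pc i =>
        (fun pc (ba : Int × Int) =>
          if ba.1 = 1 then (pc.1 + (if pc.2 > 0 then 10 else 0), pc.2 + ba.2) else pc)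
          pc (PySem.List.pyGetD (q.zip x) i (0, 0)))
      ((0 : Int), (0 : Int)) := by
    rw [hlen]
    apply PySem.List.foldl_congr_mem
    intro acc i hi
    have hi' := (PySem.List.mem_pyRange_one).1 hi
    have h0 : (0 : Int) ≤ i := hi'.1
    have h1 : i < (x.length : Int) := hi'.2
    have hzl : i < ((q.zip x).length : Int) := by rw [hlen]; exact h1
    have hq : PySem.List.pyGetD q i 0 = (PySem.List.pyGetD (q.zip x) i (0, 0)).1 := by
      rw [PySem.List.pyGetD_eq_getElem q 0 h0 (by rw [h]; exact h1),
        PySem.List.pyGetD_eq_getElem (q.zip x) (0, 0) h0 hzl]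
      rw [List.getElem_zip]
    have hx : PySem.List.pyGetD x i 0 = (PySem.List.pyGetD (q.zip x) i (0, 0)).2 := by
      rw [PySem.List.pyGetD_eq_getElem x 0 h0 h1,
        PySem.List.pyGetD_eq_getElem (q.zip x) (0, 0) h0 hzl]
      rw [List.getElem_zip]
    rw [hq, hx]
  rw [hcong, PySem.List.foldl_pyRange_zero_pyGetD' (q.zip x) ((0 : Int), (0 : Int))
    (fun pc (ba : Int × Int) =>
      if ba.1 = 1 then (pc.1 + (if pc.2 > 0 then 10 else 0), pc.2 + ba.2) else pc)
    ((0 : Int), (0 : Int)), pvZipFold_swap, pvSel]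

theorem pvProducts_map (x : List Int) :
    ∀ p : Int × Int,
      (pvProducts01 x.length).map (fun q => pvSel q x p) = pvFinals x p := by
  induction x with
  | nil => intro p; rfl
  | cons a xs ih =>
    intro p
    simp only [List.length_cons, pvProducts01, List.map_append, List.map_map, pvFinals]
    congr 1
    · rw [← ih p]
      apply List.map_congr_left
      intro q _
      simp [Function.comp, pvSel]
    · rw [← ih (pvTrans a p)]
      apply List.map_congr_left
      intro q _
      simp [Function.comp, pvSel, pvTrans]

theorem pvCalcA_eq (x : List Int) (X : Int) :
    calc_py x X = (pvFinals x (0, 0)).foldl (fun ans p => min (pvCost X p) ans) (10 ^ 10) := by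
  unfold calc_py
  have hcong : (pvProducts01 x.length).foldl
      (fun ans q =>
        let pc : Int × Int :=
          (PySem.List.pyRange 0 (x.length : Int) 1).foldl
            (fun pc i =>
              if PySem.List.pyGetD q i 0 = 1 then
                (pc.1 + (if pc.2 > 0 then 10 else 0), pc.2 + PySem.List.pyGetD x i 0)
              else pc)
            ((0 : Int), (0 : Int))
        let point : Int := if pc.2 > 0 then pc.1 + |pc.2 - X| else 10 ^ 10
        min point ans) (10 ^ 10)
      = (pvProducts01 x.length).foldl
        (fun ans q => min (pvCost X (pvSel q x (0, 0))) ans) (10 ^ 10) := by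
    apply PySem.List.foldl_congr_mem
    intro ans q hq
    rw [pvInner_eq q x (pvProducts01_length hq)]
    rfl
  rw [hcong]
  have hm : (pvProducts01 x.length).foldl
      (fun ans q => min (pvCost X (pvSel q x (0, 0))) ans) (10 ^ 10)
      = ((pvProducts01 x.length).map (fun q => pvSel q x (0, 0))).foldl
        (fun ans p => min (pvCost X p) ans) (10 ^ 10) :=
    (List.foldl_map (f := fun q => pvSel q x ((0 : Int), (0 : Int)))
      (g := fun ans p => min (pvCost X p) ans)
      (l := pvProducts01 x.length) (init := (10 : Int) ^ 10)).symm
  rw [hm, pvProducts_map]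

-- ---------- B-side: reachable states ----------

theorem pvMem_foldl_stepP (xs : List Int) :
    ∀ (P : List (Int × Int)) (p : Int × Int),
      p ∈ xs.foldl pvStepP P ↔ ∃ q ∈ P, p ∈ pvFinals xs q := by
  induction xs with
  | nil =>
    intro P p
    simp [pvFinals]
  | cons a t ih =>
    intro P p
    rw [List.foldl_cons, ih]
    constructor
    · rintro ⟨q, hq, hf⟩
      rcases List.mem_append.1 hq with hq' | hq'
      · exact ⟨q, hq', by simp [pvFinals, hf]⟩
      · rcases List.mem_map.1 hq' with ⟨q₀, hq₀, rfl⟩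
        exact ⟨q₀, hq₀, by simp [pvFinals, hf]⟩
    · rintro ⟨q, hq, hf⟩
      simp only [pvFinals, List.mem_append] at hf
      rcases hf with hf | hf
      · exact ⟨q, List.mem_append.2 (Or.inl hq), hf⟩
      · exact ⟨pvTrans a q, List.mem_append.2 (Or.inr (List.mem_map.2 ⟨q, hq, rfl⟩)), hf⟩

theorem pvMinJ_stepP (P : List (Int × Int)) (a t : Int) :
    pvMinJ (pvStepP P a) t = pvOmin (pvMinJ P t) ((pvMinJ P (t - a)).map (· + pvGate (t - a))) := by
  unfold pvMinJ pvStepP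
  rw [List.filter_append, List.map_append, pvMinL_append]
  congr 1
  rw [List.filter_map]
  simp only [Function.comp_def]
  have hfil : (P.filter (fun p => decide ((pvTrans a p).1 = t)))
      = P.filter (fun p => p.1 = t - a) := by
    apply List.filter_congr
    intro p _
    simp only [pvTrans, decide_eq_decide]
    omega
  rw [hfil]
  have hmap : ((P.filter (fun p => p.1 = t - a)).map (pvTrans a)).map (·.2)
      = ((P.filter (fun p => p.1 = t - a)).map (·.2)).map (· + pvGate (t - a)) := by
    rw [List.map_map, List.map_map]
    apply List.map_congr_left
    intro p hp
    have := (List.mem_filter.1 hp).2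
    simp only [decide_eq_true_eq] at this
    simp [Function.comp, pvTrans, this]
  rw [hmap, pvMinL_map_add]

-- ---------- B-side: the dict fold ----------

theorem pvUpd_get? (a : Int) (d : PySem.Dict Int Int) (p : Int × Int) (t : Int) :
    (pvUpd a d p).get? t =
      if t = p.1 + a then pvOmin (d.get? t) (some (p.2 + pvGate p.1)) else d.get? t := by
  unfold pvUpd pvGate
  cases hg : d.get? (p.1 + a) with
  | none =>
    simp only [hg]
    by_cases ht : t = p.1 + a
    · subst ht
      rw [PySem.Dict.get?_insert_self, if_pos rfl, hg]
      rfl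
    · rw [PySem.Dict.get?_insert_of_ne _ _ ht, if_neg ht]
  | some v =>
    simp only [hg]
    by_cases hc : p.2 + (if p.1 > 0 then 10 else 0) < v
    · rw [if_pos hc]
      by_cases ht : t = p.1 + a
      · subst ht
        rw [PySem.Dict.get?_insert_self, if_pos rfl, hg]
        simp only [pvOmin]
        congr 1
        rw [min_eq_right (le_of_lt hc)]
      · rw [PySem.Dict.get?_insert_of_ne _ _ ht, if_neg ht]
    · rw [if_neg hc]
      by_cases ht : t = p.1 + a
      · subst ht
        rw [if_pos rfl, hg]
        simp only [pvOmin]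
        congr 1
        rw [min_eq_left (not_lt.1 hc)]
      · rw [if_neg ht]

theorem pvUpd_nodup (a : Int) (d : PySem.Dict Int Int) (p : Int × Int)
    (h : d.keys.Nodup) : (pvUpd a d p).keys.Nodup := by
  simp only [pvUpd]
  cases hg : d.get? (p.1 + a) with
  | none => simp only [hg]; exact PySem.Dict.nodup_keys_insert _ _ _ h
  | some v =>
    simp only [hg]
    repeat' split
    all_goals first
      | exact PySem.Dict.nodup_keys_insert _ _ _ h
      | exact h

theorem pvFoldUpd_get? (a : Int) (l : List (Int × Int)) :
    ∀ (d : PySem.Dict Int Int), (l.map (·.1)).Nodup → ∀ t : Int,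
      (l.foldl (pvUpd a) d).get? t =
        match l.find? (fun p => decide (p.1 = t - a)) with
        | none => d.get? t
        | some p => pvOmin (d.get? t) (some (p.2 + pvGate p.1)) := by
  induction l with
  | nil => intro d _ t; rfl
  | cons p rest ih =>
    intro d hnd t
    rw [List.map_cons, List.nodup_cons] at hnd
    have hnd' : (rest.map (·.1)).Nodup := hnd.2
    have hnotin : p.1 ∉ rest.map (·.1) := hnd.1
    rw [List.foldl_cons, ih _ hnd']
    by_cases ht : t = p.1 + a
    · subst ht
      have hrest : rest.find? (fun q => decide (q.1 = p.1 + a - a)) = none := by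
        rw [List.find?_eq_none]
        intro q hq
        simp only [decide_eq_true_eq]
        intro hq1
        exact hnotin (List.mem_map.2 ⟨q, hq, by omega⟩)
      rw [hrest]
      have hfind : List.find? (fun q => decide (q.1 = p.1 + a - a)) (p :: rest)
          = some p := by
        rw [List.find?_cons_of_pos]
        simp
      rw [hfind, pvUpd_get?, if_pos rfl]
    · have hd : (pvUpd a d p).get? t = d.get? t := by
        rw [pvUpd_get?, if_neg ht]
      have hfind : List.find? (fun q => decide (q.1 = t - a)) (p :: rest)
          = rest.find? (fun q => decide (q.1 = t - a)) := by
        rw [List.find?_cons_of_neg]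
        simp only [decide_eq_true_eq]
        omega
      rw [hfind]
      cases rest.find? (fun q => decide (q.1 = t - a)) with
      | none => simpa using hd
      | some q => simp only [hd]

theorem pvStepD_inv (a : Int) (d : PySem.Dict Int Int) (P : List (Int × Int))
    (h : pvInv d P) : pvInv (pvStepD a d) (pvStepP P a) := by
  obtain ⟨hnd, hget⟩ := h
  have hitems : (d.items.map (·.1)).Nodup := hnd
  constructor
  · exact pvFoldlPreserves (fun d' p hp => pvUpd_nodup a d' p hp) d.items d hnd
  · intro t
    rw [pvStepD, pvFoldUpd_get? a d.items d hitems t, pvMinJ_stepP, ← hget, ← hget]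
    cases hg : d.get? (t - a) with
    | none =>
      have hfind : d.items.find? (fun p => decide (p.1 = t - a)) = none := by
        rw [List.find?_eq_none]
        intro p hp
        simp only [decide_eq_true_eq]
        intro hp1
        have : t - a ∈ d.keys := by
          rw [← hp1]
          exact PySem.Dict.mem_keys_of_mem_items _ hp
        rw [PySem.Dict.get?_eq_none_iff_not_mem_keys] at hg
        exact hg this
      rw [hfind]
      cases d.get? t <;> rfl
    | some j =>
      have hmem : (t - a, j) ∈ d.items := PySem.Dict.mem_items_of_get?_eq_some _ hg
      cases hf : d.items.find? (fun p => decide (p.1 = t - a)) with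
      | none =>
        rw [List.find?_eq_none] at hf
        exact absurd (by simp : (fun p : Int × Int => decide (p.1 = t - a)) (t - a, j) = true)
          (hf _ hmem)
      | some p =>
        have hp1 : p.1 = t - a := by
          have := List.find?_some hf
          simpa using this
        have hpmem : p ∈ d.items := List.mem_of_find?_eq_some hf
        have hpj : p.2 = j := by
          have := PySem.Dict.get?_of_mem_items d (k := p.1) (v := p.2)
            (by simpa using hpmem) hnd
          rw [hp1, hg] at this
          exact Option.some.inj this.symm
        show pvOmin (d.get? t) (some (p.2 + pvGate p.1))
            = pvOmin (d.get? t) (Option.map (fun x => x + pvGate (t - a)) (some j))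
        rw [hp1, hpj]
        rfl

theorem pvInv_foldl (xs : List Int) :
    ∀ (d : PySem.Dict Int Int) (P : List (Int × Int)), pvInv d P →
      pvInv (xs.foldl (fun dp a => pvStepD a dp) d) (xs.foldl pvStepP P) := by
  induction xs with
  | nil => intro d P h; exact h
  | cons a t ih => intro d P h; exact ih _ _ (pvStepD_inv a d P h)

theorem pvInv_init : pvInv (PySem.Dict.ofList [((0 : Int), (0 : Int))]) [((0 : Int), (0 : Int))] := by
  constructor
  · decide
  · intro s
    have he : PySem.Dict.ofList [((0 : Int), (0 : Int))] = PySem.Dict.mk [((0 : Int), (0 : Int))] := rfl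
    rw [he, PySem.Dict.get?_mk_cons]
    by_cases hs : s = 0
    · subst hs; rfl
    · have h0 : ((0 : Int) == s) = false := by simp [Ne.symm hs]
      rw [h0]
      simp only [Bool.false_eq_true, if_false]
      have hf : ([((0 : Int), (0 : Int))].filter (fun p => p.1 = s)) = [] := by
        simp [List.filter, Ne.symm hs]
      rw [pvMinJ, hf]
      rfl

-- ---------- final-fold conversion and assembly ----------

theorem pvFinalFold_eq (X : Int) (l : List (Int × Int)) :
    ∀ ans : Int, ans ≤ 10 ^ 10 →
      l.foldl (fun ans (p : Int × Int) => if p.1 > 0 then min ans (p.2 + |p.1 - X|) else ans) ans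
        = l.foldl (fun ans p => min (pvCost X p) ans) ans := by
  induction l with
  | nil => intro ans _; rfl
  | cons p t ih =>
    intro ans hans
    simp only [List.foldl_cons]
    by_cases hp : p.1 > 0
    · rw [if_pos hp]
      have : pvCost X p = p.2 + |p.1 - X| := by rw [pvCost, if_pos hp]
      rw [this, min_comm]
      exact ih _ (le_trans (min_le_right _ _) hans)
    · rw [if_neg hp]
      have : pvCost X p = 10 ^ 10 := by rw [pvCost, if_neg hp]
      rw [this, min_eq_right hans]
      exact ih _ hans

theorem pvCost_mono (X : Int) (s j j' : Int) (h : j ≤ j') :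
    pvCost X (s, j) ≤ pvCost X (s, j') := by
  unfold pvCost
  by_cases hs : s > 0 <;> simp [hs] <;> omega

theorem pvMain (x : List Int) (X : Int) : calc_py x X = calc_py_alt x X := by
  have hB : calc_py_alt x X =
      (x.foldl (fun dp a => pvStepD a dp) (PySem.Dict.ofList [((0 : Int), (0 : Int))])).items.foldl
        (fun ans (p : Int × Int) => if p.1 > 0 then min ans (p.2 + |p.1 - X|) else ans)
        (10 ^ 10) := rfl
  have hinv : pvInv (x.foldl (fun dp a => pvStepD a dp) (PySem.Dict.ofList [((0 : Int), (0 : Int))]))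
      (x.foldl pvStepP [((0 : Int), (0 : Int))]) :=
    pvInv_foldl x _ _ pvInv_init
  obtain ⟨hnd, hget⟩ := hinv
  rw [hB, pvFinalFold_eq X _ (10 ^ 10) le_rfl, pvCalcA_eq]
  have hmemP : ∀ p : Int × Int,
      p ∈ x.foldl pvStepP [((0 : Int), (0 : Int))] ↔ p ∈ pvFinals x (0, 0) := by
    intro p
    rw [pvMem_foldl_stepP]
    constructor
    · rintro ⟨q, hq, hf⟩
      simp only [List.mem_singleton] at hq
      subst hq
      exact hf
    · intro hf
      exact ⟨(0, 0), List.mem_singleton.2 rfl, hf⟩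
  apply le_antisymm
  · rcases pvFoldF_cases X
        (x.foldl (fun dp a => pvStepD a dp) (PySem.Dict.ofList [((0 : Int), (0 : Int))])).items
        (10 ^ 10) with h | ⟨p, hp, h⟩
    · rw [h]
      exact pvFoldF_le X _ _
    · rw [h]
      have hg : (x.foldl (fun dp a => pvStepD a dp)
          (PySem.Dict.ofList [((0 : Int), (0 : Int))])).get? p.1 = some p.2 :=
        PySem.Dict.get?_of_mem_items _ (k := p.1) (v := p.2) (by simpa using hp) hnd
      rw [hget] at hg
      unfold pvMinJ at hg
      have hmem2 := pvMinL_mem hg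
      rcases List.mem_map.1 hmem2 with ⟨q, hq, hq2⟩
      have hq1 : q.1 = p.1 := by simpa using (List.mem_filter.1 hq).2
      have hqP : q ∈ x.foldl pvStepP [((0 : Int), (0 : Int))] := (List.mem_filter.1 hq).1
      have hqp : q = p := Prod.ext hq1 hq2
      subst hqp
      exact pvFoldF_le_mem X _ _ q ((hmemP q).1 hqP)
  · rcases pvFoldF_cases X (pvFinals x (0, 0)) (10 ^ 10) with h | ⟨p, hp, h⟩
    · rw [h]
      exact pvFoldF_le X _ _
    · rw [h]
      have hpP : p ∈ x.foldl pvStepP [((0 : Int), (0 : Int))] := (hmemP p).2 hp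
      have hfil : p.2 ∈ ((x.foldl pvStepP [((0 : Int), (0 : Int))]).filter
          (fun r => r.1 = p.1)).map (·.2) :=
        List.mem_map.2 ⟨p, List.mem_filter.2 ⟨hpP, by simp⟩, rfl⟩
      cases hm : pvMinJ (x.foldl pvStepP [((0 : Int), (0 : Int))]) p.1 with
      | none =>
        exfalso
        unfold pvMinJ at hm
        refine pvMinL_ne_none ?_ hm
        intro hnil
        rw [hnil] at hfil
        simp at hfil
      | some m =>
        have hle : m ≤ p.2 := pvMinL_le hm _ hfil
        have hg : (x.foldl (fun dp a => pvStepD a dp)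
            (PySem.Dict.ofList [((0 : Int), (0 : Int))])).get? p.1 = some m := by
          rw [hget]
          exact hm
        have hitem : (p.1, m) ∈ (x.foldl (fun dp a => pvStepD a dp)
            (PySem.Dict.ofList [((0 : Int), (0 : Int))])).items :=
          PySem.Dict.mem_items_of_get?_eq_some _ hg
        refine le_trans (pvFoldF_le_mem X _ _ (p.1, m) hitem) ?_
        have h2 := pvCost_mono X p.1 m p.2 hle
        simpa using h2


-- ===== VERDICT (by name: the statement is the Claim_ definition above) =====
theorem calc_py_spec : Claim_equal_calc_py := by
  intro x X _
  unfold Spec_calc_py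
  exact pvMain x X
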